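-- pv_equiv track=rewrite | github.com/pla2n/python_practice | python/best20/12.maratang.py | solution
-- ===== SOURCE A (Python) =====
-- import itertools
-- import itertools
--
-- def solution(data):
--     def removeindex(A, n):
--         for i in range(len(A)):
--             for j in range(n-1):
--                 if A[i][j]+1 == A[i][j+1]:
--                     A[i] = ()
--                     break
--         A = list(filter(lambda x:x != (), A))
--         return A
--
--     index = [0, 1, 2, 3, 4, 5, 6, 7]
--     I3 = list(itertools.combinations(index, 3))
--     I4 = list(itertools.combinations(index, 4))
--
--     I3 = removeindex(I3, 3)
--     I4 = removeindex(I4, 4)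
--
--     output = list(map(lambda x:sum([data[i] for i in (x)]), I3+I4))
--     return sorted(output, reverse=True)[0]
-- ===== SOURCE B (Python) =====
-- def solution(data):
--     # best(i, k): max sum of exactly k pairwise non-consecutive indices from i..7,
--     # or None if k of them do not fit.
--     def best(i, k):
--         if k == 0:
--             return 0
--         if i > 7:
--             return None
--         skip = best(i + 1, k)
--         rest = best(i + 2, k - 1)
--         take = None if rest is None else data[i] + rest
--         if skip is None:
--             return take
--         if take is None:
--             return skip
--         return max(skip, take)
--
--     return max(best(0, 3), best(0, 4))
-- ===== Notes on version B (the rewrite author's own statement) =====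
-- stated objective: alternative
-- what changed: A enumerates all 3- and 4-element index combinations of range(8), filters out those with consecutive indices, sums each and sorts the sums descending; B computes the best sum directly by a take/skip recursion on (position, remaining count) over data[0:8], never materialising combinations.
import Mathlib
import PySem

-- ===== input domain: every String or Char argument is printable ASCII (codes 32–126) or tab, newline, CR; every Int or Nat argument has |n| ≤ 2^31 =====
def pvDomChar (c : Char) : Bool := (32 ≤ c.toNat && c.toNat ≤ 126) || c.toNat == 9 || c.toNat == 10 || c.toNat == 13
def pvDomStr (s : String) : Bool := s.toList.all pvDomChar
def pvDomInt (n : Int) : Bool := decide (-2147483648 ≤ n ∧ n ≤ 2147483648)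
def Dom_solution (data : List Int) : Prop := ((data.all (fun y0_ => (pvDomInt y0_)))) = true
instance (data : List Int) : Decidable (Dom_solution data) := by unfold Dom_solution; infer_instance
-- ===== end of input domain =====

-- B replaces A's exhaustive enumeration of all 3/4-element index combinations with a
-- take/skip recursion on (position, remaining) computing the best sum directly (objective: alternative).

-- ===== PORT A =====
-- itertools.combinations(l, k), lexicographic order
def pvCombos : List Int → Nat → List (List Int)
  | _, 0 => [[]]
  | [], _ + 1 => []
  | x :: xs, k + 1 => (pvCombos xs k).map (fun t => x :: t) ++ pvCombos xs (k + 1)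

-- A's removeindex: blank out tuples holding two consecutive indices, then filter them away
def pvRemoveindex (A : List (List Int)) (n : Int) : List (List Int) :=
  ((A.map (fun t =>
      if (PySem.List.pyRange 0 (n - 1) 1).any
          (fun j => decide (PySem.List.pyGetD t j 0 + 1 = PySem.List.pyGetD t (j + 1) 0))
      then ([] : List Int) else t)).filter (fun t => t ≠ []))

def solution (data : List Int) : Int :=
  let index : List Int := [0, 1, 2, 3, 4, 5, 6, 7]
  let I3 := pvRemoveindex (pvCombos index 3) 3
  let I4 := pvRemoveindex (pvCombos index 4) 4
  -- data[i] raises IndexError when len(data) < 8: excluded by Pre_solution (pyGetD default unused there)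
  let output := (I3 ++ I4).map (fun x => (x.map (fun i => PySem.List.pyGetD data i 0)).sum)
  PySem.List.pyGetD (PySem.List.sorted output (fun v => v) true) 0 0

-- ===== PORT B =====
-- best i k = max sum of exactly k pairwise non-consecutive indices from i..7 (none if impossible)
def pvBest (data : List Int) (i k : Nat) : Option Int :=
  if k = 0 then some 0
  else if i > 7 then none
  else
    let skip := pvBest data (i + 1) k
    let take := (pvBest data (i + 2) (k - 1)).map
      (fun r => PySem.List.pyGetD data (i : Int) 0 + r)
    match skip, take with
    | none, t => t
    | some s, none => some s
    | some s, some t => some (max s t)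
termination_by 8 - i
decreasing_by all_goals omega

-- Python's max(best(0,3), best(0,4)); both are always non-None, so .getD is exact
def solution_alt (data : List Int) : Int :=
  max ((pvBest data 0 3).getD 0) ((pvBest data 0 4).getD 0)

-- ===== PRECONDITION & SPEC =====
-- A indexes data[0..7], raising IndexError when len(data) < 8: those inputs are excluded.
def Pre_solution (data : List Int) : Prop := 8 ≤ data.length
instance (data : List Int) : Decidable (Pre_solution data) := by unfold Pre_solution; infer_instance
def pvWitness_solution : List Int := [5, -3, 7, 1, 0, 2, -4, 6]

def Spec_solution (data : List Int) (out : Int) : Prop := out = solution_alt data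
instance (data : List Int) (out : Int) : Decidable (Spec_solution data out) := by unfold Spec_solution; infer_instance

-- ===== CLAIM (what is proved, stated in full; the proofs are below) =====
def Claim_equal_solution : Prop := ∀ (data : List Int), Dom_solution data → Pre_solution data → Spec_solution data (solution data)

-- ===== LEMMAS AND PROOFS =====

-- the maximum-combiner of pvBest, as a named function
def pvOmax (a b : Option Int) : Option Int :=
  match a, b with
  | none, t => t
  | some s, none => some s
  | some s, some t => some (max s t)

-- optional maximum of a list of candidates
def pvListMaxO : List Int → Option Int
  | [] => none
  | x :: xs => pvOmax (some x) (pvListMaxO xs)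

-- all candidate sums of exactly k non-consecutive indices from i..7 (the sum-list pvBest maximises)
def pvS (data : List Int) (i k : Nat) : List Int :=
  if k = 0 then [0]
  else if i > 7 then []
  else pvS data (i + 1) k ++
    (pvS data (i + 2) (k - 1)).map (fun r => PySem.List.pyGetD data (i : Int) 0 + r)
termination_by 8 - i
decreasing_by all_goals omega

theorem pvOmax_assoc (a b c : Option Int) :
    pvOmax (pvOmax a b) c = pvOmax a (pvOmax b c) := by
  cases a <;> cases b <;> cases c <;> simp [pvOmax, max_assoc]

theorem pvListMaxO_append (xs ys : List Int) :
    pvListMaxO (xs ++ ys) = pvOmax (pvListMaxO xs) (pvListMaxO ys) := by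
  induction xs with
  | nil => simp [pvListMaxO, pvOmax]
  | cons x xs ih => simp [pvListMaxO, ih, ← pvOmax_assoc]

theorem pvListMaxO_map_add (c : Int) (xs : List Int) :
    pvListMaxO (xs.map (fun r => c + r)) = (pvListMaxO xs).map (fun r => c + r) := by
  induction xs with
  | nil => simp [pvListMaxO]
  | cons x xs ih =>
    simp only [List.map_cons, pvListMaxO, ih]
    cases pvListMaxO xs <;> simp [pvOmax]

-- pvBest computes the optional maximum of the candidate-sum list
theorem pvBest_eq (data : List Int) : ∀ (n i k : Nat), 8 - i ≤ n →
    pvBest data i k = pvListMaxO (pvS data i k) := by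
  intro n
  induction n with
  | zero =>
    intro i k hn
    rw [pvBest, pvS]
    by_cases hk : k = 0
    · simp [hk, pvListMaxO, pvOmax]
    · have hi : i > 7 := by omega
      simp [hk, hi, pvListMaxO]
  | succ n ih =>
    intro i k hn
    rw [pvBest, pvS]
    by_cases hk : k = 0
    · simp [hk, pvListMaxO, pvOmax]
    · by_cases hi : i > 7
      · simp [hk, hi, pvListMaxO]
      · simp only [hk, hi, if_false]
        rw [ih (i + 1) k (by omega), ih (i + 2) (k - 1) (by omega),
          pvListMaxO_append, pvListMaxO_map_add]
        cases pvListMaxO (pvS data (i + 1) k) <;>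
          cases pvListMaxO (pvS data (i + 2) (k - 1)) <;> simp [pvOmax]

theorem alt_listmax (data : List Int) :
    solution_alt data =
      max ((pvListMaxO (pvS data 0 3)).getD 0) ((pvListMaxO (pvS data 0 4)).getD 0) := by
  rw [solution_alt, pvBest_eq data 8 0 3 (by omega), pvBest_eq data 8 0 4 (by omega)]

-- the left fold by max is a member of a::t …
theorem foldl_max_mem (t : List Int) : ∀ a : Int, List.foldl max a t ∈ a :: t := by
  induction t with
  | nil => intro a; simp
  | cons x t ih =>
    intro a
    simp only [List.foldl_cons]
    rcases List.mem_cons.mp (ih (max a x)) with h' | h'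
    · rw [h']
      rcases max_choice a x with hm | hm <;> rw [hm] <;> simp
    · simp [h']

-- … so the head of a descending sort is that fold
theorem head_sorted_rev_cons (a : Int) (t : List Int) :
    PySem.List.pyGetD (PySem.List.sorted (a :: t) (fun v => v) true) 0 0 =
      List.foldl max a t := by
  have hperm := PySem.List.sorted_perm (a :: t) (fun v : Int => v) true
  have hpw := PySem.List.sorted_pairwise_rev (a :: t) (fun v : Int => v)
  have hub := PySem.List.le_foldl_max t a
  have hmem := foldl_max_mem t a
  rcases hs : PySem.List.sorted (a :: t) (fun v : Int => v) true with _ | ⟨h, s⟩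
  · rw [hs] at hperm
    exact absurd (hperm.symm.mem_iff.mp hmem) (by simp)
  · rw [hs] at hperm hpw
    have hhl : h ∈ a :: t := hperm.mem_iff.mp (by simp)
    have hms : List.foldl max a t ∈ h :: s := hperm.symm.mem_iff.mp hmem
    have hle : List.foldl max a t ≤ h := by
      rcases List.mem_cons.mp hms with h' | h'
      · exact le_of_eq h'
      · exact (List.pairwise_cons.mp hpw).1 _ h'
    have hge : h ≤ List.foldl max a t := by
      rcases List.mem_cons.mp hhl with h' | h'
      · rw [h']; exact hub.1
      · exact hub.2 h h'
    simp [PySem.List.pyGetD_zero_cons]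
    omega

-- A's surviving index tuples, evaluated once and for all
theorem pvI34 : pvRemoveindex (pvCombos [0,1,2,3,4,5,6,7] 3) 3 ++ pvRemoveindex (pvCombos [0,1,2,3,4,5,6,7] 4) 4 = [[0, 2, 4], [0, 2, 5], [0, 2, 6], [0, 2, 7], [0, 3, 5], [0, 3, 6], [0, 3, 7], [0, 4, 6], [0, 4, 7], [0, 5, 7], [1, 3, 5], [1, 3, 6], [1, 3, 7], [1, 4, 6], [1, 4, 7], [1, 5, 7], [2, 4, 6], [2, 4, 7], [2, 5, 7], [3, 5, 7], [0, 2, 4, 6], [0, 2, 4, 7], [0, 2, 5, 7], [0, 3, 5, 7], [1, 3, 5, 7]] := by decide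

-- the 25 candidate sums of A on a list of length ≥ 8
theorem sums_eval (d0 d1 d2 d3 d4 d5 d6 d7 : Int) (rest : List Int) :
    ([[0, 2, 4], [0, 2, 5], [0, 2, 6], [0, 2, 7], [0, 3, 5], [0, 3, 6], [0, 3, 7], [0, 4, 6], [0, 4, 7], [0, 5, 7], [1, 3, 5], [1, 3, 6], [1, 3, 7], [1, 4, 6], [1, 4, 7], [1, 5, 7], [2, 4, 6], [2, 4, 7], [2, 5, 7], [3, 5, 7], [0, 2, 4, 6], [0, 2, 4, 7], [0, 2, 5, 7], [0, 3, 5, 7], [1, 3, 5, 7]] : List (List Int)).map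
      (fun x => (x.map (fun i => PySem.List.pyGetD (d0::d1::d2::d3::d4::d5::d6::d7::rest) i 0)).sum)
    = [d0 + (d2 + d4), d0 + (d2 + d5), d0 + (d2 + d6), d0 + (d2 + d7), d0 + (d3 + d5), d0 + (d3 + d6), d0 + (d3 + d7), d0 + (d4 + d6), d0 + (d4 + d7), d0 + (d5 + d7), d1 + (d3 + d5), d1 + (d3 + d6), d1 + (d3 + d7), d1 + (d4 + d6), d1 + (d4 + d7), d1 + (d5 + d7), d2 + (d4 + d6), d2 + (d4 + d7), d2 + (d5 + d7), d3 + (d5 + d7), d0 + (d2 + (d4 + d6)), d0 + (d2 + (d4 + d7)), d0 + (d2 + (d5 + d7)), d0 + (d3 + (d5 + d7)), d1 + (d3 + (d5 + d7))] := by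
  simp [PySem.List.pyGetD_ofNat', List.getD]

-- B's candidate-sum lists on a list of length ≥ 8
theorem pvS3_eval (d0 d1 d2 d3 d4 d5 d6 d7 : Int) (rest : List Int) :
    pvS (d0::d1::d2::d3::d4::d5::d6::d7::rest) 0 3
    = [d3 + (d5 + d7), d2 + (d5 + d7), d2 + (d4 + d7), d2 + (d4 + d6), d1 + (d5 + d7), d1 + (d4 + d7), d1 + (d4 + d6), d1 + (d3 + d7), d1 + (d3 + d6), d1 + (d3 + d5), d0 + (d5 + d7), d0 + (d4 + d7), d0 + (d4 + d6), d0 + (d3 + d7), d0 + (d3 + d6), d0 + (d3 + d5), d0 + (d2 + d7), d0 + (d2 + d6), d0 + (d2 + d5), d0 + (d2 + d4)] := by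
  simp [pvS, PySem.List.pyGetD_ofNat', List.getD]

theorem pvS4_eval (d0 d1 d2 d3 d4 d5 d6 d7 : Int) (rest : List Int) :
    pvS (d0::d1::d2::d3::d4::d5::d6::d7::rest) 0 4
    = [d1 + (d3 + (d5 + d7)), d0 + (d3 + (d5 + d7)), d0 + (d2 + (d5 + d7)), d0 + (d2 + (d4 + d7)), d0 + (d2 + (d4 + d6))] := by
  simp [pvS, PySem.List.pyGetD_ofNat', List.getD]

set_option maxHeartbeats 2000000 in
theorem solution_spec : Claim_equal_solution := by
  intro data _ hpre
  unfold Spec_solution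
  rcases data with _ | ⟨d0, _ | ⟨d1, _ | ⟨d2, _ | ⟨d3, _ | ⟨d4, _ | ⟨d5, _ | ⟨d6, _ | ⟨d7, rest⟩⟩⟩⟩⟩⟩⟩⟩ <;>
    first
    | (simp only [Pre_solution, List.length_cons, List.length_nil] at hpre; omega)
    | (simp only [solution]
       rw [pvI34, sums_eval, head_sorted_rev_cons, alt_listmax, pvS3_eval, pvS4_eval]
       simp only [pvListMaxO, pvOmax, Option.getD, List.foldl]
       apply le_antisymm <;> (simp only [max_le_iff]; repeat' constructor) <;>
         (simp only [le_max_iff]; omega))
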